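-- pv_equiv track=rewrite | github.com/miread/typoglycemia | Typoglycemia.py | scramble_words
-- ===== SOURCE A (Python) =====
-- import string
--
-- def scramble_words(words):
--
--     func_input = words.split()
--     list_len = len(func_input)
--
--     for idx in range(list_len):
--         idx_count = 0  # This tracks the index of characters within words
--         punc = {}
--
--         # Check for punctuation and store location in the dictionary
--         for char in func_input[idx]:
--             if char in string.punctuation:
--                 punc[idx_count] = char
--             idx_count += 1
--
--         idx_count = 0  # Reset
--
--         # Search again;  this time delete the punctuation
--         for char in func_input[idx]:
--             if char in string.punctuation:
--                 func_input[idx] = func_input[idx][:idx_count] + func_input[idx][idx_count + 1:]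
--             else:
--                 idx_count += 1
--
--         # Sort the inside letters by alphabetical order;  ignore single characters
--         if len(func_input[idx]) > 1:
--             func_input[idx] = func_input[idx][0] + ''.join(sorted(func_input[idx][1:-1])) + func_input[idx][-1]
--
--         # Add the punctuation back into its place
--         for key in punc:
--             func_input[idx] = func_input[idx][:key] + punc[key] + func_input[idx][key:]
--
--     return ' '.join(func_input)
-- ===== SOURCE B (Python) =====
-- import string
--
-- def scramble_words(words):
--     out = []
--     for word in words.split():
--         mask = [c in string.punctuation for c in word]
--         letters = [c for c in word if c not in string.punctuation]
--         if len(letters) > 1: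
--             letters = [letters[0]] + sorted(letters[1:-1]) + [letters[-1]]
--         it = iter(letters)
--         out.append(''.join(word[i] if mask[i] else next(it) for i in range(len(word))))
--     return ' '.join(out)
-- ===== Notes on version B (the rewrite author's own statement) =====
-- stated objective: simpler
-- what changed: Replaces A's three per-word phases (position dict of punctuation, repeated slice-deletion of punctuation, then ascending slice-reinsertion) by one forward assembly pass: collect the letters, reorder them as first+sorted(middle)+last, and rebuild the word left-to-right pulling letters from an iterator where the mask is not punctuation.
import Mathlib
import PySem

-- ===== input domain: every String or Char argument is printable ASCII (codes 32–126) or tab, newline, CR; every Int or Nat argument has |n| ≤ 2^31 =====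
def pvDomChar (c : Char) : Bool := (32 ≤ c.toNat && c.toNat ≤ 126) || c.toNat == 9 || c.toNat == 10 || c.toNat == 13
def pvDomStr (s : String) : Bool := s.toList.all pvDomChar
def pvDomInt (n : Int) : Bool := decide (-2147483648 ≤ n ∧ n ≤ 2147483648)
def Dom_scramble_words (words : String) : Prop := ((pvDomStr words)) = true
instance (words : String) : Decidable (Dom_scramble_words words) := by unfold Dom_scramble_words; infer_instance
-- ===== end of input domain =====

-- B replaces A's per-word phases (punctuation position dict, slice-deletion, ascending slice-reinsertion)
-- by one forward assembly pass pulling reordered letters where the character is not punctuation (objective: simpler).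

-- string.punctuation (shared constant of both sources)
def pvPunct : List Char :=
  ['!','"','#','$','%','&','\'','(',')','*','+',',','-','.','/',':',';','<','=','>','?','@','[','\\',']','^','_','`','{','|','}','~']

-- `char in string.punctuation`
def pvIsPunct (c : Char) : Bool := pvPunct.contains c

-- ===== PORT A =====
-- one iteration of A's `for idx in range(list_len)` body, acting on the word at that index
def pvScrambleA (w : List Char) : List Char :=
  -- first inner loop: punc[idx_count] = char for punctuation, idx_count += 1 each char
  let punc : PySem.Dict Int Char :=
    (w.foldl (fun (st : PySem.Dict Int Char × Int) c =>
      (if pvIsPunct c then st.1.insert st.2 c else st.1, st.2 + 1)) (PySem.Dict.empty, 0)).1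
  -- second inner loop: delete the punctuation by slicing, idx_count advances on non-punctuation only
  let w1 : List Char :=
    (w.foldl (fun (st : List Char × Int) c =>
      if pvIsPunct c then
        (PySem.List.slice st.1 none (some st.2) ++ PySem.List.slice st.1 (some (st.2 + 1)) none, st.2)
      else (st.1, st.2 + 1)) (w, 0)).1
  -- sort the inside letters
  let w2 : List Char :=
    if 1 < w1.length then
      match PySem.List.pyGet? w1 0, PySem.List.pyGet? w1 (-1) with
      | some a, some z =>
          a :: PySem.List.sorted (PySem.List.slice w1 (some 1) (some (-1))) (fun x => x) false ++ [z]
      | _, _ => w1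
    else w1
  -- `for key in punc:` reinsert punc[key] at key (iterated as items: each key with its value)
  punc.items.foldl (fun s kc =>
    PySem.List.slice s none (some kc.1) ++ [kc.2] ++ PySem.List.slice s (some kc.1) none) w2

def scramble_words (words : String) : String :=
  String.ofList (PySem.Chars.join [' '] ((PySem.Chars.split₀ words.toList).map pvScrambleA))

-- ===== PORT B =====
-- letters = [letters[0]] + sorted(letters[1:-1]) + [letters[-1]] if len(letters) > 1
def pvReorderB (ls : List Char) : List Char :=
  match ls with
  | a :: b :: rest =>
      a :: PySem.List.sorted ((b :: rest).dropLast) (fun x => x) false ++ [(b :: rest).getLast (by simp)]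
  | _ => ls

-- ''.join(word[i] if mask[i] else next(it) for i in range(len(word)))
def pvAssembleB (w : List Char) (ls : List Char) : List Char :=
  match w, ls with
  | [], _ => []
  | c :: w', ls =>
      if pvIsPunct c then c :: pvAssembleB w' ls
      else match ls with
        | l :: ls' => l :: pvAssembleB w' ls'
        | [] => pvAssembleB w' []   -- unreachable: the iterator holds exactly the non-punctuation count

def pvScrambleB (w : List Char) : List Char :=
  pvAssembleB w (pvReorderB (w.filter (fun c => !pvIsPunct c)))

def scramble_words_alt (words : String) : String :=
  String.ofList (PySem.Chars.join [' '] ((PySem.Chars.split₀ words.toList).map pvScrambleB))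

-- ===== PRECONDITION & SPEC =====
def Spec_scramble_words (words : String) (out : String) : Prop := out = scramble_words_alt words
instance (words : String) (out : String) : Decidable (Spec_scramble_words words out) := by unfold Spec_scramble_words; infer_instance

-- ===== CLAIM (what is proved, stated in full; the proofs are below) =====
def Claim_equal_scramble_words : Prop := ∀ (words : String), Dom_scramble_words words → Spec_scramble_words words (scramble_words words)

-- ===== LEMMAS AND PROOFS =====

-- the punctuation characters of w paired with their original indices, counting from n
def pvPuncPairs (n : Int) : List Char → List (Int × Char)
  | [] => []
  | c :: s => if pvIsPunct c then (n, c) :: pvPuncPairs (n + 1) s else pvPuncPairs (n + 1) s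

-- A's first loop builds exactly the (index, char) pairs of the punctuation, in index order
theorem pvDictLoop (s : List Char) (d : PySem.Dict Int Char) (n : Int)
    (h : ∀ k ∈ d.keys, k < n) :
    ((s.foldl (fun (st : PySem.Dict Int Char × Int) c =>
        (if pvIsPunct c then st.1.insert st.2 c else st.1, st.2 + 1)) (d, n)).1).items
      = d.items ++ pvPuncPairs n s := by
  induction s generalizing d n with
  | nil => simp [pvPuncPairs]
  | cons c s ih =>
    simp only [List.foldl_cons, pvPuncPairs]
    by_cases hc : pvIsPunct c
    · simp only [hc, if_true]
      rw [ih (d.insert n c) (n + 1) ?keys]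
      · rw [PySem.Dict.items_insert_of_not_contains]
        · simp
        · cases hcon : d.contains n with
          | false => rfl
          | true =>
            exact absurd (h n ((PySem.Dict.contains_iff_mem_keys _ _).mp hcon)) (lt_irrefl n)
      case keys =>
        intro k hk
        rcases (PySem.Dict.mem_keys_insert _ _ _ _).mp hk with rfl | hk'
        · omega
        · exact lt_trans (h k hk') (by omega)
    · simp only [hc, Bool.false_eq_true, if_false]
      rw [ih d (n + 1) (fun k hk => lt_trans (h k hk) (by omega))]

-- A's second loop deletes exactly the punctuation characters
theorem pvDelLoop (s acc : List Char) :
    (s.foldl (fun (st : List Char × Int) c =>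
      if pvIsPunct c then
        (PySem.List.slice st.1 none (some st.2) ++ PySem.List.slice st.1 (some (st.2 + 1)) none, st.2)
      else (st.1, st.2 + 1)) (acc ++ s, (acc.length : Int))).1
    = acc ++ s.filter (fun c => !pvIsPunct c) := by
  induction s generalizing acc with
  | nil => simp
  | cons c s ih =>
    simp only [List.foldl_cons, List.filter_cons]
    by_cases hc : pvIsPunct c
    · have h1 : PySem.List.slice (acc ++ c :: s) none (some (acc.length : Int)) = acc := by
        rw [PySem.List.slice_to_natCast]; simp
      have h2 : PySem.List.slice (acc ++ c :: s) (some ((acc.length : Int) + 1)) none = s := by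
        have he : ((acc.length : Int) + 1) = ((acc.length + 1 : Nat) : Int) := by push_cast; ring
        rw [he, PySem.List.slice_from_natCast]
        simp
      simp only [hc, if_true, h1, h2]
      rw [ih acc]
      simp
    · have h3 : ((acc.length : Int) + 1) = (((acc ++ [c]).length : Nat) : Int) := by simp
      have h4 : acc ++ c :: s = (acc ++ [c]) ++ s := by simp
      simp only [hc, Bool.false_eq_true, if_false]
      rw [h3, h4, ih (acc ++ [c])]
      simp

-- A's reinsertion fold equals B's forward assembly, for a letter list of exactly
-- the non-punctuation length (pre is the already-rebuilt prefix)
theorem pvMerge (s pre ls : List Char)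
    (hlen : ls.length = (s.filter (fun c => !pvIsPunct c)).length) :
    ((pvPuncPairs (pre.length : Int) s).foldl (fun t kc =>
        PySem.List.slice t none (some kc.1) ++ [kc.2] ++ PySem.List.slice t (some kc.1) none)
      (pre ++ ls))
    = pre ++ pvAssembleB s ls := by
  induction s generalizing pre ls with
  | nil =>
    simp only [List.filter_nil, List.length_nil, List.length_eq_zero_iff] at hlen
    subst hlen
    simp [pvPuncPairs, pvAssembleB]
  | cons c s ih =>
    by_cases hc : pvIsPunct c
    · simp only [pvPuncPairs, hc, if_true, List.foldl_cons, pvAssembleB]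
      have h1 : PySem.List.slice (pre ++ ls) none (some (pre.length : Int)) = pre := by
        rw [PySem.List.slice_to_natCast]; simp
      have h2 : PySem.List.slice (pre ++ ls) (some (pre.length : Int)) none = ls := by
        rw [PySem.List.slice_from_natCast]; simp
      rw [h1, h2]
      have h3 : ((pre.length : Int) + 1) = (((pre ++ [c]).length : Nat) : Int) := by
        simp
      have hlen' : ls.length = (s.filter (fun c => !pvIsPunct c)).length := by
        simpa [List.filter_cons, hc] using hlen
      rw [h3, ih (pre ++ [c]) ls hlen']
      simp
    · have hls : ∃ l ls', ls = l :: ls' := by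
        rcases ls with _ | ⟨l, ls'⟩
        · exfalso
          simp [hc] at hlen
        · exact ⟨l, ls', rfl⟩
      rcases hls with ⟨l, ls', rfl⟩
      simp only [pvPuncPairs, hc, Bool.false_eq_true, if_false, pvAssembleB]
      have h3 : ((pre.length : Int) + 1) = (((pre ++ [l]).length : Nat) : Int) := by
        simp
      have hlen' : ls'.length = (s.filter (fun c => !pvIsPunct c)).length := by
        simpa [List.filter_cons, hc] using hlen
      rw [h3, show pre ++ l :: ls' = pre ++ [l] ++ ls' by simp, ih (pre ++ [l]) ls' hlen']
      simp

-- a middle slice is drop-then-dropLast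
theorem pvSliceMid (a : Char) (t : List Char) :
    PySem.List.slice (a :: t) (some 1) (some (-1)) = t.dropLast := by
  simp only [PySem.List.slice, List.length_cons, Int.reduceNeg, Order.lt_one_iff,
    PySem.List.clampIdx_neg_ofNat, add_tsub_cancel_right, zero_le_one, Nat.cast_add,
    Nat.cast_one, le_add_iff_nonneg_left, Nat.cast_nonneg, PySem.List.clampIdx_of_nonneg_of_le,
    Int.toNat_one, List.drop_succ_cons, List.drop_zero]
  rw [List.dropLast_eq_take]

-- A's sort step applied to the letter list equals B's reorder
theorem pvSortEq (L : List Char) :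
    (if 1 < L.length then
      match PySem.List.pyGet? L 0, PySem.List.pyGet? L (-1) with
      | some a, some z =>
          a :: PySem.List.sorted (PySem.List.slice L (some 1) (some (-1))) (fun x => x) false ++ [z]
      | _, _ => L
    else L) = pvReorderB L := by
  rcases L with _ | ⟨a, _ | ⟨b, rest⟩⟩
  · rfl
  · rfl
  · have hlen : 1 < (a :: b :: rest).length := by simp
    rw [if_pos hlen, PySem.List.pyGet?_zero_cons, PySem.List.pyGet?_neg_one, pvSliceMid]
    simp [pvReorderB, List.getLast?_eq_some_getLast]

-- reorder preserves the length
theorem pvReorderB_length (L : List Char) : (pvReorderB L).length = L.length := by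
  rcases L with _ | ⟨a, _ | ⟨b, rest⟩⟩
  · rfl
  · rfl
  · simp [pvReorderB, PySem.List.length_sorted]

-- per-word equality of the two programs
theorem pvWordEq (w : List Char) : pvScrambleA w = pvScrambleB w := by
  unfold pvScrambleA pvScrambleB
  dsimp only
  rw [pvDictLoop w PySem.Dict.empty 0 (by simp [PySem.Dict.empty])]
  have hdel := pvDelLoop w []
  simp only [List.length_nil, Nat.cast_zero, List.nil_append] at hdel
  rw [hdel, pvSortEq]
  have := pvMerge w [] (pvReorderB (w.filter (fun c => !pvIsPunct c)))
    (by rw [pvReorderB_length])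
  simpa [PySem.Dict.empty] using this

-- ===== VERDICT (by name: the statement is the Claim_ definition above) =====
theorem scramble_words_spec : Claim_equal_scramble_words := by
  intro words _
  unfold Spec_scramble_words scramble_words scramble_words_alt
  congr 1
  congr 1
  exact List.map_congr_left (fun w _ => pvWordEq w)
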